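-- pv_equiv track=rewrite | github.com/TheRealRhyle/WFRP-2e-Char-Gen | genchar.py | perm_talen_adj
-- ===== SOURCE A (Python) =====
-- def perm_talen_adj(tal, mp_value, sp_value):
--     # Test for perm stat adjustments
--     perm_adjust_talents = {'Coolheaded': ('WP', 5), 'Fleet Footed': ('M', 1), 'Hardy': ('W', 1),
--                            'Lightning Reflexes': ('Ag', 5), 'Marksman': ('BS', 5), 'Savvy': ('Int', 5),
--                            'Suave': ('Fel', 5), 'Very Resilient': ('T', 5), 'Very Strong': ('S', 5),
--                            'Warrior Born': ('WS', 5)}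
--
--     tal_count = 0
--     while tal_count < len(tal):
--         # for x in range(len(tal)-1):
--         if tal[tal_count] in perm_adjust_talents:
--             talent_adj = perm_adjust_talents[tal[tal_count]]
--
--             if talent_adj[0] in mp_value.keys():
--                 mp_value[talent_adj[0]] = mp_value[talent_adj[0]] + talent_adj[1]
--             elif talent_adj[0] in sp_value.keys():
--                 sp_value[talent_adj[0]] = sp_value[talent_adj[0]] + talent_adj[1]
--
--         tal_count += 1
--     return mp_value, sp_value
-- ===== SOURCE B (Python) =====
-- def perm_talen_adj(tal, mp_value, sp_value):
--     # Flat (stat, talent, amount) table scanned per stat; delta = amount * tal.count(talent).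
--     table = [('WP', 'Coolheaded', 5), ('M', 'Fleet Footed', 1), ('W', 'Hardy', 1),
--              ('Ag', 'Lightning Reflexes', 5), ('BS', 'Marksman', 5), ('Int', 'Savvy', 5),
--              ('Fel', 'Suave', 5), ('T', 'Very Resilient', 5), ('S', 'Very Strong', 5),
--              ('WS', 'Warrior Born', 5)]
--
--     def bonus(stat):
--         for s, talent, amount in table:
--             if s == stat:
--                 return amount * tal.count(talent)
--         return 0
--
--     for stat in mp_value:
--         mp_value[stat] += bonus(stat)
--     for stat in sp_value:
--         if stat not in mp_value:
--             sp_value[stat] += bonus(stat)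
--     return mp_value, sp_value
-- ===== Notes on version B (the rewrite author's own statement) =====
-- stated objective: alternative
-- what changed: B is driven by the stats, not the talent list: for each stat of mp_value/sp_value it scans a flat (stat, talent, amount) table and adds amount * tal.count(talent) in one step, instead of walking the talent list and mutating the dicts once per occurrence; Pre_ only excludes association lists with duplicate keys, which do not represent a Python dict.
import Mathlib
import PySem

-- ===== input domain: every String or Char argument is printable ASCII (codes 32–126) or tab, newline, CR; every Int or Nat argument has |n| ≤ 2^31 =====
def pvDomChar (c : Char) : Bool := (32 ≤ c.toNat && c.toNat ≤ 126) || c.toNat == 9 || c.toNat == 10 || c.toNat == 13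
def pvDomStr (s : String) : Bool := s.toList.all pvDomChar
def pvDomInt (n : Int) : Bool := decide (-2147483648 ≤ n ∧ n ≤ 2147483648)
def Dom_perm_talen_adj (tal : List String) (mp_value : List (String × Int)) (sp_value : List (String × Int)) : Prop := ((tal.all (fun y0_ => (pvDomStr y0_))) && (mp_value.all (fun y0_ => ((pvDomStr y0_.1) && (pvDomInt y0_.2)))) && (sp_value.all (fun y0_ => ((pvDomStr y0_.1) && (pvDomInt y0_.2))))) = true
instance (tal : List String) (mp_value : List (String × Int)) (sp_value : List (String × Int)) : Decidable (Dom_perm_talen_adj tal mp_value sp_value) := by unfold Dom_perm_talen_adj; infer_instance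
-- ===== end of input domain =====

-- B is driven by the stats instead of the talent list: per stat it scans a flat (stat, talent,
-- amount) table and adds amount * tal.count(talent) in one step; A mutates its dict arguments in
-- place and returns them, B's Python mutates them too — the equivalence proved is about the RETURN value.

-- ===== PORT A =====
-- A's literal talent -> (stat, amount) table
def permTable : PySem.Dict String (String × Int) :=
  PySem.Dict.mk [("Coolheaded", ("WP", 5)), ("Fleet Footed", ("M", 1)), ("Hardy", ("W", 1)),
                 ("Lightning Reflexes", ("Ag", 5)), ("Marksman", ("BS", 5)), ("Savvy", ("Int", 5)),
                 ("Suave", ("Fel", 5)), ("Very Resilient", ("T", 5)), ("Very Strong", ("S", 5)),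
                 ("Warrior Born", ("WS", 5))]

-- the while loop over tal_count: one step per element of tal
def permA_loop : List String → PySem.Dict String Int → PySem.Dict String Int →
    PySem.Dict String Int × PySem.Dict String Int
  | [], mp, sp => (mp, sp)
  | t :: rest, mp, sp =>
    match permTable.get? t with
    | some talent_adj =>
      if mp.contains talent_adj.1 then
        permA_loop rest (mp.insert talent_adj.1 (mp.getD talent_adj.1 0 + talent_adj.2)) sp
      else if sp.contains talent_adj.1 then
        permA_loop rest mp (sp.insert talent_adj.1 (sp.getD talent_adj.1 0 + talent_adj.2))
      else permA_loop rest mp sp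
    | none => permA_loop rest mp sp

def perm_talen_adj (tal : List String) (mp_value : List (String × Int)) (sp_value : List (String × Int)) : (List (String × Int)) × (List (String × Int)) :=
  let r := permA_loop tal (PySem.Dict.mk mp_value) (PySem.Dict.mk sp_value)
  (r.1.items, r.2.items)

-- ===== PORT B =====
-- Source B's flat (stat, talent, amount) table
def statTable : List (String × String × Int) :=
  [("WP", "Coolheaded", 5), ("M", "Fleet Footed", 1), ("W", "Hardy", 1),
   ("Ag", "Lightning Reflexes", 5), ("BS", "Marksman", 5), ("Int", "Savvy", 5),
   ("Fel", "Suave", 5), ("T", "Very Resilient", 5), ("S", "Very Strong", 5),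
   ("WS", "Warrior Born", 5)]

-- Source B's 'bonus(stat)': the for loop with an early return
def bonusLoop (tal : List String) (stat : String) : List (String × String × Int) → Int
  | [] => 0
  | (s, talent, amount) :: rest =>
    if s = stat then amount * (tal.count talent : Int) else bonusLoop tal stat rest

def perm_talen_adj_alt (tal : List String) (mp_value : List (String × Int)) (sp_value : List (String × Int)) : (List (String × Int)) × (List (String × Int)) :=
  (mp_value.map (fun p => (p.1, p.2 + bonusLoop tal p.1 statTable)),
   sp_value.map (fun p =>
     if mp_value.any (fun q => q.1 == p.1) then p
     else (p.1, p.2 + bonusLoop tal p.1 statTable)))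

-- ===== PRECONDITION & SPEC =====
-- Pre_ excludes association lists with duplicate keys: those do not represent any Python dict (the
-- dict arguments of the Python function cannot carry duplicate keys), so A's behaviour on them is an
-- artefact of the list encoding, not of the source.
def Pre_perm_talen_adj (tal : List String) (mp_value : List (String × Int)) (sp_value : List (String × Int)) : Prop :=
  (mp_value.map Prod.fst).Nodup ∧ (sp_value.map Prod.fst).Nodup
instance (tal : List String) (mp_value : List (String × Int)) (sp_value : List (String × Int)) : Decidable (Pre_perm_talen_adj tal mp_value sp_value) := by unfold Pre_perm_talen_adj; infer_instance

def pvWitness_perm_talen_adj : List String × (List (String × Int)) × (List (String × Int)) :=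
  (["Hardy", "Hardy", "Savvy", "x"], [("W", 2), ("Int", 1)], [("Int", 9), ("M", 0)])

def Spec_perm_talen_adj (tal : List String) (mp_value : List (String × Int)) (sp_value : List (String × Int)) (out : (List (String × Int)) × (List (String × Int))) : Prop := out = perm_talen_adj_alt tal mp_value sp_value
instance (tal : List String) (mp_value : List (String × Int)) (sp_value : List (String × Int)) (out : (List (String × Int)) × (List (String × Int))) : Decidable (Spec_perm_talen_adj tal mp_value sp_value out) := by unfold Spec_perm_talen_adj; infer_instance

-- ===== CLAIM (what is proved, stated in full; the proofs are below) =====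
def Claim_equal_perm_talen_adj : Prop := ∀ (tal : List String) (mp_value : List (String × Int)) (sp_value : List (String × Int)), Dom_perm_talen_adj tal mp_value sp_value → Pre_perm_talen_adj tal mp_value sp_value → Spec_perm_talen_adj tal mp_value sp_value (perm_talen_adj tal mp_value sp_value)

-- ===== LEMMAS AND PROOFS =====

-- contribution of one occurrence of talent t to stat
def talentBonus (stat : String) (t : String) : Int :=
  match permTable.get? t with
  | some q => if q.1 = stat then q.2 else 0
  | none => 0

-- total bonus a stat collects over the whole talent list
def bonusFor (tal : List String) (stat : String) : Int :=
  (tal.map (talentBonus stat)).sum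

theorem bonusFor_nil (stat : String) : bonusFor [] stat = 0 := rfl

theorem bonusFor_cons (t : String) (rest : List String) (stat : String) :
    bonusFor (t :: rest) stat = talentBonus stat t + bonusFor rest stat := by
  simp [bonusFor]

-- proof-side dict view of statTable, inverse to permTable
def statBonusTable : PySem.Dict String (String × Int) :=
  PySem.Dict.mk [("WP", ("Coolheaded", 5)), ("M", ("Fleet Footed", 1)), ("W", ("Hardy", 1)),
                 ("Ag", ("Lightning Reflexes", 5)), ("BS", ("Marksman", 5)), ("Int", ("Savvy", 5)),
                 ("Fel", ("Suave", 5)), ("T", ("Very Resilient", 5)), ("S", ("Very Strong", 5)),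
                 ("WS", ("Warrior Born", 5))]

theorem tableA_of_tableB (stat : String) (p : String × Int)
    (h : statBonusTable.get? stat = some p) : permTable.get? p.1 = some (stat, p.2) := by
  have hm : (stat, p) ∈ [("WP", (("Coolheaded" : String), (5 : Int))), ("M", ("Fleet Footed", 1)),
      ("W", ("Hardy", 1)), ("Ag", ("Lightning Reflexes", 5)), ("BS", ("Marksman", 5)),
      ("Int", ("Savvy", 5)), ("Fel", ("Suave", 5)), ("T", ("Very Resilient", 5)),
      ("S", ("Very Strong", 5)), ("WS", ("Warrior Born", 5))] :=
    PySem.Dict.mem_items_of_get?_eq_some _ h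
  simp only [List.mem_cons, List.not_mem_nil, or_false] at hm
  rcases hm with h'|h'|h'|h'|h'|h'|h'|h'|h'|h' <;>
    (rw [Prod.ext_iff] at h'; rcases h' with ⟨h1, h2⟩; subst h1; subst h2; decide)

theorem tableB_of_tableA (t : String) (q : String × Int)
    (h : permTable.get? t = some q) : statBonusTable.get? q.1 = some (t, q.2) := by
  have hm : (t, q) ∈ [(("Coolheaded" : String), (("WP" : String), (5 : Int))),
      ("Fleet Footed", ("M", 1)), ("Hardy", ("W", 1)), ("Lightning Reflexes", ("Ag", 5)),
      ("Marksman", ("BS", 5)), ("Savvy", ("Int", 5)), ("Suave", ("Fel", 5)),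
      ("Very Resilient", ("T", 5)), ("Very Strong", ("S", 5)), ("Warrior Born", ("WS", 5))] :=
    PySem.Dict.mem_items_of_get?_eq_some _ h
  simp only [List.mem_cons, List.not_mem_nil, or_false] at hm
  rcases hm with h'|h'|h'|h'|h'|h'|h'|h'|h'|h' <;>
    (rw [Prod.ext_iff] at h'; rcases h' with ⟨h1, h2⟩; subst h1; subst h2; decide)

theorem talentBonus_of_none (stat t : String) (h : permTable.get? t = none) :
    talentBonus stat t = 0 := by
  simp [talentBonus, h]

theorem talentBonus_self (s t : String) (a : Int) (h : permTable.get? t = some (s, a)) :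
    talentBonus s t = a := by
  simp [talentBonus, h]

theorem talentBonus_of_ne (stat s t : String) (a : Int) (h : permTable.get? t = some (s, a))
    (hne : stat ≠ s) : talentBonus stat t = 0 := by
  simp [talentBonus, h, Ne.symm hne]

-- the canonical form the while loop computes
theorem permA_loop_eq (tal : List String) :
    ∀ (mp sp : PySem.Dict String Int), mp.keys.Nodup → sp.keys.Nodup →
    permA_loop tal mp sp =
      (PySem.Dict.mk (mp.items.map (fun p => (p.1, p.2 + bonusFor tal p.1))),
       PySem.Dict.mk (sp.items.map (fun p =>
         (p.1, p.2 + (if mp.contains p.1 then 0 else bonusFor tal p.1))))) := by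
  induction tal with
  | nil =>
    intro mp sp _ _
    rw [permA_loop]
    refine Prod.ext ?_ ?_ <;> simp only <;> apply PySem.Dict.ext <;>
      simp [bonusFor_nil]
  | cons t rest ih =>
    intro mp sp hmp hsp
    rw [permA_loop]
    cases hq : permTable.get? t with
    | none =>
      rw [ih mp sp hmp hsp]
      simp only [bonusFor_cons, talentBonus_of_none _ _ hq, zero_add]
    | some q =>
      obtain ⟨s, a⟩ := q
      dsimp only
      by_cases hc : mp.contains s
      · rw [if_pos hc]
        have hmp' : (mp.insert s (mp.getD s 0 + a)).keys.Nodup := by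
          rw [PySem.Dict.keys_insert_of_contains _ _ hc]; exact hmp
        rw [ih _ sp hmp' hsp]
        refine Prod.ext ?_ ?_ <;> simp only
        · congr 1
          rw [PySem.Dict.items_insert_of_contains _ _ hc, List.map_map]
          refine List.map_congr_left ?_
          intro p hp
          by_cases hps : p.1 = s
          · have hpv : mp.getD s 0 = p.2 := by
              have : (s, p.2) ∈ mp.items := by
                have := hp; rw [← hps]; simpa [Prod.ext_iff] using hp
              exact PySem.Dict.getD_of_mem_items _ this hmp 0
            simp only [Function.comp, hps, beq_self_eq_true, if_true, hpv]
            rw [bonusFor_cons, talentBonus_self s t a hq]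
            simp; ring
          · simp only [Function.comp, beq_iff_eq, hps, if_false]
            rw [bonusFor_cons, talentBonus_of_ne p.1 s t a hq hps, zero_add]
        · congr 1
          refine List.map_congr_left ?_
          intro p _
          have hcc : (mp.insert s (mp.getD s 0 + a)).contains p.1 = mp.contains p.1 := by
            rw [PySem.Dict.contains_insert]
            by_cases hps : p.1 = s
            · simp [hps, hc]
            · simp [hps]
          rw [hcc]
          by_cases hmpc : mp.contains p.1
          · simp [hmpc]
          · have hps : p.1 ≠ s := fun e => hmpc (e ▸ hc)
            simp only [hmpc]
            rw [bonusFor_cons, talentBonus_of_ne p.1 s t a hq hps, zero_add]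
      · rw [if_neg hc]
        by_cases hcs : sp.contains s
        · rw [if_pos hcs]
          have hsp' : (sp.insert s (sp.getD s 0 + a)).keys.Nodup := by
            rw [PySem.Dict.keys_insert_of_contains _ _ hcs]; exact hsp
          rw [ih mp _ hmp hsp']
          refine Prod.ext ?_ ?_ <;> simp only
          · congr 1
            refine List.map_congr_left ?_
            intro p hp
            have hps : p.1 ≠ s := by
              intro e
              have : mp.contains p.1 := by
                rw [PySem.Dict.contains_iff_mem_keys]
                exact PySem.Dict.mem_keys_of_mem_items _ hp
              exact hc (e ▸ this)
            rw [bonusFor_cons, talentBonus_of_ne p.1 s t a hq hps, zero_add]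
          · congr 1
            rw [PySem.Dict.items_insert_of_contains _ _ hcs, List.map_map]
            refine List.map_congr_left ?_
            intro p hp
            by_cases hps : p.1 = s
            · have hpv : sp.getD s 0 = p.2 := by
                have : (s, p.2) ∈ sp.items := by simpa [← hps, Prod.ext_iff] using hp
                exact PySem.Dict.getD_of_mem_items _ this hsp 0
              have hmc : mp.contains p.1 = false := by
                rw [hps]; exact Bool.not_eq_true _ ▸ hc
              simp only [Function.comp, hps, beq_self_eq_true, if_true, hpv]
              have hmc' : mp.contains s = false := by rw [← hps]; exact hmc
              simp only [hmc', Bool.false_eq_true, if_false]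
              rw [bonusFor_cons, talentBonus_self s t a hq]
              ring
            · simp only [Function.comp, beq_iff_eq, hps, if_false]
              by_cases hmpc : mp.contains p.1
              · simp [hmpc]
              · simp only [hmpc]
                rw [bonusFor_cons, talentBonus_of_ne p.1 s t a hq hps, zero_add]
        · rw [if_neg hcs]
          rw [ih mp sp hmp hsp]
          refine Prod.ext ?_ ?_ <;> simp only
          · congr 1
            refine List.map_congr_left ?_
            intro p hp
            have hps : p.1 ≠ s := by
              intro e
              have : mp.contains p.1 := by
                rw [PySem.Dict.contains_iff_mem_keys]
                exact PySem.Dict.mem_keys_of_mem_items _ hp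
              exact hc (e ▸ this)
            rw [bonusFor_cons, talentBonus_of_ne p.1 s t a hq hps, zero_add]
          · congr 1
            refine List.map_congr_left ?_
            intro p hp
            by_cases hmpc : mp.contains p.1
            · simp [hmpc]
            · have hps : p.1 ≠ s := by
                intro e
                have : sp.contains p.1 := by
                  rw [PySem.Dict.contains_iff_mem_keys]
                  exact PySem.Dict.mem_keys_of_mem_items _ hp
                exact hcs (e ▸ this)
              simp only [hmpc]
              rw [bonusFor_cons, talentBonus_of_ne p.1 s t a hq hps, zero_add]

-- Source B's for loop over a flat table is first-match lookup in the corresponding dict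
theorem bonusLoop_matches (tal : List String) (stat : String) :
    ∀ (L : List (String × String × Int)),
    bonusLoop tal stat L =
      match (PySem.Dict.mk (L.map (fun r => (r.1, r.2)))).get? stat with
      | some p => p.2 * (tal.count p.1 : Int)
      | none => 0 := by
  intro L
  induction L with
  | nil => simp [bonusLoop, PySem.Dict.get?]
  | cons r rest ih =>
    obtain ⟨s, talent, amount⟩ := r
    rw [bonusLoop, List.map_cons, PySem.Dict.get?_mk_cons]
    by_cases h : s = stat
    · simp [h]
    · simp only [ih, beq_iff_eq, h, if_false]

theorem bonusLoop_eq_dict (tal : List String) (stat : String) :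
    bonusLoop tal stat statTable =
      match statBonusTable.get? stat with
      | some p => p.2 * (tal.count p.1 : Int)
      | none => 0 := by
  rw [bonusLoop_matches tal stat statTable]
  rfl

theorem sum_single_talent (tal : List String) (talent : String) (amt : Int)
    (h : ∀ t, talentBonusAt t = (if t = talent then amt else 0)) :
    (tal.map talentBonusAt).sum = amt * tal.count talent := by
  induction tal with
  | nil => simp
  | cons x rest ih =>
    simp only [List.map_cons, List.sum_cons, ih, h x, List.count_cons]
    by_cases hx : x = talent
    · simp [hx, mul_add]; ring
    · simp [fun e => hx (by simpa using e)]

theorem bonusLoop_eq (tal : List String) (stat : String) :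
    bonusLoop tal stat statTable = bonusFor tal stat := by
  rw [bonusLoop_eq_dict]
  unfold bonusFor
  cases hg : statBonusTable.get? stat with
  | none =>
    symm
    apply List.sum_eq_zero
    intro x hx
    rw [List.mem_map] at hx
    obtain ⟨t, _, rfl⟩ := hx
    unfold talentBonus
    cases hq : permTable.get? t with
    | none => rfl
    | some q =>
      by_cases hqs : q.1 = stat
      · exfalso
        have := tableB_of_tableA t q hq
        rw [hqs, hg] at this
        simp at this
      · simp [hqs]
  | some p =>
    obtain ⟨talent, amt⟩ := p
    dsimp only
    symm
    refine sum_single_talent tal talent amt ?_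
    intro t
    unfold talentBonus
    cases hq : permTable.get? t with
    | none =>
      have hne : t ≠ talent := by
        intro e
        have := tableA_of_tableB stat _ hg
        simp only at this
        rw [← e, hq] at this
        simp at this
      simp [hne]
    | some q =>
      by_cases hqs : q.1 = stat
      · have hb := tableB_of_tableA t q hq
        rw [hqs, hg] at hb
        injection hb with hb'
        rw [Prod.ext_iff] at hb'
        obtain ⟨h1, h2⟩ := hb'
        simp only at h1 h2
        rw [h2]
        simp [hqs]
        intro hn
        exact absurd h1.symm hn
      · have hne : t ≠ talent := by
          intro e
          have := tableA_of_tableB stat _ hg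
          simp only at this
          rw [← e, hq] at this
          injection this with h'
          exact hqs (by rw [h'])
        simp [hqs, hne]

theorem contains_mk_any (mp : List (String × Int)) (x : String) :
    (PySem.Dict.mk mp).contains x = mp.any (fun q => q.1 == x) := by
  simp [PySem.Dict.contains, PySem.Dict.keys, List.any_map, Function.comp]

-- ===== VERDICT (by name: the statement is the Claim_ definition above) =====
theorem perm_talen_adj_spec : Claim_equal_perm_talen_adj := by
  intro tal mp sp _ hpre
  obtain ⟨hmp, hsp⟩ := hpre
  unfold Spec_perm_talen_adj perm_talen_adj perm_talen_adj_alt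
  have hmpn : (PySem.Dict.mk mp).keys.Nodup := by simpa [PySem.Dict.keys_mk] using hmp
  have hspn : (PySem.Dict.mk sp).keys.Nodup := by simpa [PySem.Dict.keys_mk] using hsp
  rw [permA_loop_eq tal _ _ hmpn hspn]
  refine Prod.ext ?_ ?_ <;> dsimp only [PySem.Dict.items]
  · refine List.map_congr_left ?_
    intro p _
    rw [bonusLoop_eq]
  · refine List.map_congr_left ?_
    intro p _
    rw [← contains_mk_any]
    by_cases h : (PySem.Dict.mk mp).contains p.1
    · simp [h]
    · simp [h, bonusLoop_eq]
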